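-- pv_equiv track=rewrite | github.com/clinton180/Analyzing-SAT-solvers-with-Geometric-Resolution | Comp_499A/SAT/sat_gap.py | mask_to_intervals
-- ===== SOURCE A (Python) =====
-- from itertools import product
-- from typing import List, Optional, Sequence, Tuple
--
-- def prefix_to_interval(prefix: str, width: int) -> Tuple[int, int]:
--     """Half-open interval [lo, hi) inside [0, 2^width)."""
--     if prefix == "":
--         return (0, 1 << width)
--     L = len(prefix)
--     if L > width:
--         raise ValueError(f"Prefix length {L} exceeds dimension width {width}")
--     v = int(prefix, 2)
--     shift = width - L
--     lo = v << shift
--     hi = (v + 1) << shift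
--     return (lo, hi)
--
-- def mask_to_intervals(mask: str, width: int) -> List[Tuple[int, int]]:
--     """
--     Convert one grouped mask string over {0,1,x} into a list of DYADIC intervals [lo,hi).
--
--     Same dyadic rule as mask_to_prefixes:
--       - Let k = highest index with mask[k] in {0,1}.
--       - If no fixed bits => full interval [(0,2^width))
--       - If any 'x' appears in positions 0..k => split on those missing bits (all combos)
--       - Intervals correspond to prefixes of length k+1
--     """
--     fixed_positions = [i for i, ch in enumerate(mask) if ch in ("0", "1")]
--     if not fixed_positions:
--         return [(0, 1 << width)]  # full dimension
--
--     k = max(fixed_positions)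
--     missing = [i for i in range(0, k + 1) if mask[i] == "x"]
--
--     base: List[Optional[str]] = []
--     for i in range(0, k + 1):
--         ch = mask[i]
--         base.append(ch if ch in ("0", "1") else None)
--
--     if not missing:
--         prefix = "".join(base)  # type: ignore[arg-type]
--         return [prefix_to_interval(prefix, width)]
--
--     out: List[Tuple[int, int]] = []
--     for bits in product("01", repeat=len(missing)):
--         tmp = base[:]
--         for idx, pos in enumerate(missing):
--             tmp[pos] = bits[idx]
--         prefix = "".join(tmp)  # type: ignore[arg-type]
--         out.append(prefix_to_interval(prefix, width))
--     return out
-- ===== SOURCE B (Python) =====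
-- def mask_to_intervals(mask, width):
--     """Recursive binary subdivision of [0, 2**width) guided by the mask prefix."""
--     k = -1
--     for i, ch in enumerate(mask):
--         if ch in ("0", "1"):
--             k = i
--     if k < 0:
--         return [(0, 1 << width)]
--     if k + 1 > width:
--         raise ValueError(f"Prefix length {k + 1} exceeds dimension width {width}")
--     out = []
--
--     def recurse(pos, lo, hi):
--         if pos > k:
--             out.append((lo, hi))
--             return
--         mid = (lo + hi) // 2
--         ch = mask[pos]
--         if ch == "0":
--             recurse(pos + 1, lo, mid)
--         elif ch == "1":
--             recurse(pos + 1, mid, hi)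
--         else:
--             recurse(pos + 1, lo, mid)
--             recurse(pos + 1, mid, hi)
--
--     recurse(0, 0, 1 << width)
--     return out
-- ===== Notes on version B (the rewrite author's own statement) =====
-- stated objective: alternative
-- what changed: Replaces A's product-enumeration over missing bits with per-combination prefix-string construction and binary re-parsing by a recursive binary subdivision of [0, 2^width) that halves the interval at each mask position; Pre_ excludes exactly the inputs where A raises (negative width, a fixed bit beyond width, or a non-{0,1,x} character at or before the last fixed bit).
import Mathlib
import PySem

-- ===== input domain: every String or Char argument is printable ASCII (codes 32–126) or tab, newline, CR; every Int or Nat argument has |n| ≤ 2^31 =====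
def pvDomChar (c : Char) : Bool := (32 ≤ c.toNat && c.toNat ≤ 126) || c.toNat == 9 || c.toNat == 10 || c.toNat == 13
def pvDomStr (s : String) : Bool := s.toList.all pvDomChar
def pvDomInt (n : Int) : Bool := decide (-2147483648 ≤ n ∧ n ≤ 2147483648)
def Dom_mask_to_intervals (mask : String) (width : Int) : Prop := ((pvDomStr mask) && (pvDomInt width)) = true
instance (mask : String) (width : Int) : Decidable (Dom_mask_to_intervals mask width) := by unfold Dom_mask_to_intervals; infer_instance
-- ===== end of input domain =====

-- B replaces A's product-over-missing-bits pfx construction and binary re-parsing by a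
-- recursive binary subdivision of [0, 2^width) guided by the mask pfx (objective: alternative).

-- ===== PORT A =====

-- port of prefix_to_interval; 'none' is the ValueError branch; '1 << width' / 'v << shift'
-- are ported as multiplication by 2^·.toNat (exact for the nonnegative shifts Pre_ admits)
def prefix_to_interval (pfx : List Char) (width : Int) : Option (Int × Int) :=
  if pfx = [] then some (0, (2 : Int) ^ width.toNat)
  else
    let L : Int := pfx.length
    if L > width then none
    else
      -- int(pfx, 2): exact on '0'/'1' strings, the only ones reachable under Pre_
      let v : Int := pfx.foldl (fun a c => 2 * a + (if c = '1' then 1 else 0)) 0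
      let shift := width - L
      some (v * (2 : Int) ^ shift.toNat, (v + 1) * (2 : Int) ^ shift.toNat)

-- itertools.product("01", repeat=n), in product order (leftmost position varies slowest)
def pyProduct01 : Nat → List (List Char)
  | 0 => [[]]
  | n + 1 => (pyProduct01 n).map (fun t => '0' :: t) ++ (pyProduct01 n).map (fun t => '1' :: t)

-- "".join(tmp) on a list of Optional[str]: 'none' is Python's TypeError (joining None)
def joinOpt : List (Option Char) → Option (List Char)
  | [] => some []
  | none :: _ => none
  | some c :: r => (joinOpt r).map (fun cs => c :: cs)

def mask_to_intervals (mask : String) (width : Int) : List (Int × Int) :=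
  let cs := mask.toList
  let fixed_positions : List Int :=
    ((PySem.List.enumerate cs 0).filter (fun p => p.2 == '0' || p.2 == '1')).map (fun p => p.1)
  match fixed_positions.max? with
  | none => [(0, (2 : Int) ^ width.toNat)]  -- full dimension
  | some k =>
    let missing : List Int :=
      (PySem.List.pyRange 0 (k + 1) 1).filter (fun i => PySem.List.pyGetD cs i ' ' == 'x')
    let base : List (Option Char) :=
      (PySem.List.pyRange 0 (k + 1) 1).map (fun i =>
        let ch := PySem.List.pyGetD cs i ' '
        if ch == '0' || ch == '1' then some ch else none)
    if missing = [] then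
      match joinOpt base with
      | some pfx => (prefix_to_interval pfx width).toList
      | none => []  -- TypeError; unreachable under Pre_
    else
      (pyProduct01 missing.length).foldl (fun out bits =>
        let tmp := (missing.zip bits).foldl (fun t pb => t.set pb.1.toNat (some pb.2)) base
        match joinOpt tmp with
        | some pfx => out ++ (prefix_to_interval pfx width).toList
        | none => out) []  -- the error branches are unreachable under Pre_

-- ===== PORT B =====

-- recurse(pos, lo, hi) of Source B: walking pos = 0..k through mask is the structural recursion
-- on the pfx mask[0:k+1], consumed one character per step
def recurseB : List Char → Int → Int → List (Int × Int)
  | [], lo, hi => [(lo, hi)]  -- pos > k: emit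
  | ch :: rest, lo, hi =>
    let mid := PySem.Int.floordiv (lo + hi) 2
    if ch = '0' then recurseB rest lo mid
    else if ch = '1' then recurseB rest mid hi
    else recurseB rest lo mid ++ recurseB rest mid hi

def mask_to_intervals_alt (mask : String) (width : Int) : List (Int × Int) :=
  let cs := mask.toList
  let k : Int := (PySem.List.enumerate cs 0).foldl
    (fun k p => if p.2 = '0' ∨ p.2 = '1' then p.1 else k) (-1)
  if k < 0 then [(0, (2 : Int) ^ width.toNat)]
  else if k + 1 > width then []  -- ValueError; unreachable under Pre_
  else recurseB (cs.take (k + 1).toNat) 0 ((2 : Int) ^ width.toNat)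

-- ===== PRECONDITION & SPEC =====

-- Pre_ excludes exactly the inputs on which A raises: negative width (ValueError from 1<<width or
-- from the pfx/width check), a fixed bit at position i with i+1 > width (ValueError in
-- prefix_to_interval), and a character outside {0,1,x} at or before the last fixed bit (TypeError
-- from joining None).
def Pre_mask_to_intervals (mask : String) (width : Int) : Prop :=
  0 ≤ width ∧
  ∀ i < mask.toList.length,
    (mask.toList.getD i ' ' = '0' ∨ mask.toList.getD i ' ' = '1') →
      ((i : Int) + 1 ≤ width ∧
        ∀ j ≤ i, (mask.toList.getD j ' ' = '0' ∨ mask.toList.getD j ' ' = '1' ∨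
                  mask.toList.getD j ' ' = 'x'))
instance (mask : String) (width : Int) : Decidable (Pre_mask_to_intervals mask width) := by
  unfold Pre_mask_to_intervals; infer_instance

def pvWitness_mask_to_intervals : String × Int := ("x1", 3)

def Spec_mask_to_intervals (mask : String) (width : Int) (out : List (Int × Int)) : Prop :=
  out = mask_to_intervals_alt mask width
instance (mask : String) (width : Int) (out : List (Int × Int)) :
    Decidable (Spec_mask_to_intervals mask width out) := by
  unfold Spec_mask_to_intervals; infer_instance

-- ===== CLAIM (what is proved, stated in full; the proofs are below) =====
def Claim_equal_mask_to_intervals : Prop := ∀ (mask : String) (width : Int),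
  Dom_mask_to_intervals mask width → Pre_mask_to_intervals mask width →
    Spec_mask_to_intervals mask width (mask_to_intervals mask width)

-- ===== LEMMAS AND PROOFS =====

def pvParse (cs : List Char) : Int :=
  cs.foldl (fun a c => 2 * a + (if c = '1' then 1 else 0)) 0
theorem pvParse_acc (w : List Char) (a : Int) :
    w.foldl (fun a c => 2 * a + (if c = '1' then 1 else 0)) a
      = a * 2 ^ w.length + pvParse w := by
  induction w generalizing a with
  | nil => simp [pvParse]
  | cons c r ih =>
    simp only [List.foldl_cons, List.length_cons, pvParse]
    rw [ih, ih ((2:Int) * 0 + _)]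
    ring
theorem pvParse_cons (c : Char) (w : List Char) :
    pvParse (c :: w) = (if c = '1' then 1 else 0) * 2 ^ w.length + pvParse w := by
  conv_lhs => rw [pvParse]
  rw [List.foldl_cons, pvParse_acc]
  ring
def pvSubst : List Char → List Char → List Char
  | [], _ => []
  | c :: r, bs => if c = 'x' then bs.headD '0' :: pvSubst r bs.tail else c :: pvSubst r bs
theorem pvSubst_length (r bs : List Char) : (pvSubst r bs).length = r.length := by
  induction r generalizing bs with
  | nil => rfl
  | cons c t ih => simp only [pvSubst]; split_ifs <;> simp [ih]
theorem pvProd_mem_length (n : Nat) (bs : List Char) (h : bs ∈ pyProduct01 n) :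
    bs.length = n := by
  induction n generalizing bs with
  | zero => simp [pyProduct01] at h; simp [h]
  | succ m ih =>
    simp only [pyProduct01, List.mem_append, List.mem_map] at h
    rcases h with ⟨t, ht, rfl⟩ | ⟨t, ht, rfl⟩ <;> simp [ih t ht]
def pvVals : List Char → List Int
  | [] => [0]
  | c :: r =>
    if c = '0' then pvVals r
    else if c = '1' then (pvVals r).map (fun v => 2 ^ r.length + v)
    else pvVals r ++ (pvVals r).map (fun v => 2 ^ r.length + v)
theorem pvRecurseB_eq (ds : List Char) (lo : Int) (e : Nat) :
    recurseB ds lo (lo + 2 ^ (ds.length + e))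
      = (pvVals ds).map (fun v => (lo + v * 2 ^ e, lo + (v + 1) * 2 ^ e)) := by
  induction ds generalizing lo e with
  | nil => simp [recurseB, pvVals]
  | cons c r ih =>
    have hmid : PySem.Int.floordiv (lo + (lo + 2 ^ (r.length + 1 + e))) 2
        = lo + 2 ^ (r.length + e) := by
      rw [PySem.Int.floordiv_eq_ediv_of_pos (by norm_num)]
      have : lo + (lo + 2 ^ (r.length + 1 + e)) = 2 * (lo + 2 ^ (r.length + e)) := by ring
      rw [this, Int.mul_ediv_cancel_left _ (by norm_num)]
    simp only [recurseB, pvVals, List.length_cons]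
    rw [hmid]
    split_ifs with h0 h1
    · rw [ih]
    · have : lo + 2 ^ (r.length + 1 + e) = (lo + 2 ^ (r.length + e)) + 2 ^ (r.length + e) := by ring
      rw [this, ih, List.map_map]
      congr 1; funext v; simp; constructor <;> ring
    · have h2 : lo + 2 ^ (r.length + 1 + e) = (lo + 2 ^ (r.length + e)) + 2 ^ (r.length + e) := by ring
      rw [h2, ih, ih, List.map_append, List.map_map]
      congr 2; funext v; simp; constructor <;> ring
def pvLastFixed : List Char → Int → Option Int
  | [], _ => none
  | c :: r, s =>
    match pvLastFixed r (s + 1) with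
    | some m => some m
    | none => if c = '0' ∨ c = '1' then some s else none
theorem pvLastFixed_bounds (cs : List Char) (s m : Int) (h : pvLastFixed cs s = some m) :
    s ≤ m ∧ (m - s) < cs.length ∧
      (cs.getD (m - s).toNat ' ' = '0' ∨ cs.getD (m - s).toNat ' ' = '1') := by
  induction cs generalizing s with
  | nil => simp [pvLastFixed] at h
  | cons c r ih =>
    simp only [pvLastFixed] at h
    rcases hr : pvLastFixed r (s + 1) with _ | m'
    · rw [hr] at h
      split_ifs at h with hc
      cases h
      refine ⟨le_refl _, by simp, ?_⟩
      simpa using hc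
    · rw [hr] at h; cases h
      obtain ⟨h1, h2, h3⟩ := ih (s + 1) hr
      refine ⟨by omega, by simp; omega, ?_⟩
      have he : (m - s).toNat = (m - (s + 1)).toNat + 1 := by omega
      rw [he]
      simpa using h3
theorem pvB_k (cs : List Char) (s a : Int) :
    (PySem.List.enumerate cs s).foldl (fun k p => if p.2 = '0' ∨ p.2 = '1' then p.1 else k) a
      = (pvLastFixed cs s).getD a := by
  induction cs generalizing s a with
  | nil => simp [pvLastFixed, PySem.List.enumerate_nil]
  | cons c r ih =>
    rw [PySem.List.enumerate_cons, List.foldl_cons, ih]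
    simp only [pvLastFixed]
    rcases hr : pvLastFixed r (s + 1) with _ | m'
    · simp
      split_ifs <;> rfl
    · simp
theorem pvA_k (cs : List Char) (s : Int) :
    (((PySem.List.enumerate cs s).filter (fun p => p.2 == '0' || p.2 == '1')).map
      (fun p => p.1)).max? = pvLastFixed cs s := by
  induction cs generalizing s with
  | nil => simp [pvLastFixed, PySem.List.enumerate_nil]
  | cons c r ih =>
    have hge : ∀ x ∈ (((PySem.List.enumerate r (s + 1)).filter
        (fun p => p.2 == '0' || p.2 == '1')).map (fun p => p.1)), s + 1 ≤ x := by
      intro x hx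
      simp only [List.mem_map, List.mem_filter] at hx
      obtain ⟨p, ⟨hp, _⟩, rfl⟩ := hx
      rw [PySem.List.mem_enumerate_iff] at hp
      obtain ⟨k, hk, rfl⟩ := hp
      simp
    rw [PySem.List.enumerate_cons]
    simp only [pvLastFixed, List.filter_cons]
    by_cases hc : (c == '0' || c == '1') = true
    · rw [if_pos hc, List.map_cons, List.max?_cons]
      rcases hr : pvLastFixed r (s + 1) with _ | m
      · rw [← ih] at hr
        rw [hr]
        have hor : c = '0' ∨ c = '1' := by simpa using hc
        simp
        tauto
      · have hm : s + 1 ≤ m := hge m (List.max?_mem ((ih (s + 1)).trans hr))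
        rw [ih, hr]
        simp [max_eq_right (by omega : s ≤ m)]
    · rw [if_neg hc, ih]
      have hc' : ¬(c = '0' ∨ c = '1') := by
        simpa using hc
      rcases hr : pvLastFixed r (s + 1) with _ | m <;> simp [hc']
theorem pvProd_vals (ds : List Char)
    (h : ∀ c ∈ ds, c = '0' ∨ c = '1' ∨ c = 'x') :
    (pyProduct01 (ds.count 'x')).map (fun bs => pvParse (pvSubst ds bs)) = pvVals ds := by
  induction ds with
  | nil => simp [pyProduct01, pvSubst, pvParse, pvVals]
  | cons c r ih =>
    have hr := fun c hc => h c (List.mem_cons_of_mem _ hc)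
    rcases h c List.mem_cons_self with hc | hc | hc <;> subst hc
    · have hcnt : (('0' :: r).count 'x') = r.count 'x' := by simp
      rw [hcnt, show pvVals ('0' :: r) = pvVals r from by simp [pvVals], ← ih hr]
      apply List.map_congr_left
      intro bs _
      simp only [pvSubst, if_neg (by decide : ¬('0' = 'x'))]
      rw [pvParse_cons]
      simp
    · have hcnt : (('1' :: r).count 'x') = r.count 'x' := by simp
      have : (fun bs => pvParse (pvSubst ('1' :: r) bs))
          = (fun v => 2 ^ r.length + v) ∘ (fun bs => pvParse (pvSubst r bs)) := by
        funext bs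
        simp only [pvSubst, if_neg (by decide : ¬('1' = 'x')), Function.comp]
        rw [pvParse_cons, pvSubst_length]
        simp
      rw [hcnt, this, ← List.map_map, ih hr]
      simp [pvVals]
    · have hcnt : (('x' :: r).count 'x') = r.count 'x' + 1 := by simp
      rw [hcnt]
      simp only [pyProduct01, List.map_append, List.map_map]
      have h0 : ((fun bs => pvParse (pvSubst ('x' :: r) bs)) ∘ (fun t => '0' :: t))
          = (fun bs => pvParse (pvSubst r bs)) := by
        funext bs
        simp only [Function.comp, pvSubst]
        rw [if_pos trivial]
        rw [pvParse_cons]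
        simp
      have h1 : ((fun bs => pvParse (pvSubst ('x' :: r) bs)) ∘ (fun t => '1' :: t))
          = (fun v => 2 ^ r.length + v) ∘ (fun bs => pvParse (pvSubst r bs)) := by
        funext bs
        simp only [Function.comp, pvSubst]
        rw [if_pos trivial]
        rw [pvParse_cons, pvSubst_length]
        simp
      rw [h0, h1, ← List.map_map, ih hr]
      simp [pvVals]
def pvMiss : List Char → List Nat
  | [] => []
  | c :: r => if c = 'x' then 0 :: (pvMiss r).map (· + 1) else (pvMiss r).map (· + 1)
theorem foldl_set_shift (l : List (Nat × Char)) (o : Option Char) (t : List (Option Char)) :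
    l.foldl (fun t pb => t.set (pb.1 + 1) (some pb.2)) (o :: t)
      = o :: l.foldl (fun t pb => t.set pb.1 (some pb.2)) t := by
  induction l generalizing o t with
  | nil => rfl
  | cons p l ih => simp only [List.foldl_cons, List.set_cons_succ, ih]
theorem pvSubst_join (ds : List Char)
    (h : ∀ c ∈ ds, c = '0' ∨ c = '1' ∨ c = 'x') (bs : List Char)
    (hlen : bs.length = ds.count 'x') :
    joinOpt (((pvMiss ds).zip bs).foldl (fun t pb => t.set pb.1 (some pb.2))
        (ds.map (fun ch => if ch == '0' || ch == '1' then some ch else none)))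
      = some (pvSubst ds bs) := by
  induction ds generalizing bs with
  | nil => simp [pvMiss, pvSubst, joinOpt]
  | cons c r ih =>
    have hr := fun c hc => h c (List.mem_cons_of_mem _ hc)
    have hshift : ∀ (bs' : List Char) (o : Option Char) (t : List (Option Char)),
        (((pvMiss r).map (· + 1)).zip bs').foldl (fun t pb => t.set pb.1 (some pb.2)) (o :: t)
          = o :: ((pvMiss r).zip bs').foldl (fun t pb => t.set pb.1 (some pb.2)) t := by
      intro bs' o t
      rw [List.zip_map_left, List.foldl_map]
      exact foldl_set_shift _ o t
    rcases h c List.mem_cons_self with hc | hc | hc <;> subst hc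
    · simp only [List.map_cons, pvMiss, if_neg (by decide : ¬('0' = 'x'))]
      rw [hshift]
      simp only [show (('0' == '0' || '0' == '1') = true) = True by simp, if_true, joinOpt]
      rw [ih hr bs (by simpa [List.count_cons] using hlen)]
      simp [pvSubst]
    · simp only [List.map_cons, pvMiss, if_neg (by decide : ¬('1' = 'x'))]
      rw [hshift]
      simp only [show (('1' == '0' || '1' == '1') = true) = True by simp, if_true, joinOpt]
      rw [ih hr bs (by simpa [List.count_cons] using hlen)]
      simp [pvSubst]
    · have hb : bs ≠ [] := by
        intro hb; rw [hb] at hlen; simp at hlen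
      rcases bs with _ | ⟨b, bs'⟩
      · exact absurd rfl hb
      simp only [List.map_cons, pvMiss]
      simp only [if_true]
      have hxf : (('x' == '0' || 'x' == '1') = true) = False := by simp
      simp only [hxf, if_false]
      simp only [List.zip_cons_cons, List.foldl_cons, List.set_cons_zero]
      rw [hshift]
      simp only [joinOpt]
      rw [ih hr bs' (by simpa [List.count_cons] using hlen)]
      simp [pvSubst]

-- Nat-level bridges between A's range/index loops and the structural prefix list

theorem map_range_getD (xs : List Char) {β : Type} (g : Char → β) (d : Char) :
    (List.range xs.length).map (fun j => g (xs.getD j d)) = xs.map g := by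
  induction xs with
  | nil => rfl
  | cons c r ih =>
    rw [List.length_cons, List.range_succ_eq_map, List.map_cons, List.map_map]
    simp only [List.getD_cons_zero, List.map_cons]
    exact congrArg _ ih

theorem range_filter_miss (ds : List Char) :
    (List.range ds.length).filter (fun j => ds.getD j ' ' == 'x') = pvMiss ds := by
  induction ds with
  | nil => rfl
  | cons c r ih =>
    rw [List.length_cons, List.range_succ_eq_map, List.filter_cons, pvMiss]
    rw [List.filter_map]
    simp only [List.getD_cons_zero]
    by_cases hc : c = 'x'
    · subst hc; simp [← ih]; rfl
    · simp [hc, ← ih]; rfl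

theorem length_pvMiss (ds : List Char) : (pvMiss ds).length = ds.count 'x' := by
  induction ds with
  | nil => rfl
  | cons c r ih =>
    simp only [pvMiss, List.count_cons]
    by_cases hc : c = 'x' <;> simp [hc, ih]

-- ===== VERDICT (by name: the statement is the Claim_ definition above) =====
theorem mask_to_intervals_spec : Claim_equal_mask_to_intervals := by
  intro mask width _ hpre
  obtain ⟨hw, hfix⟩ := hpre
  unfold Spec_mask_to_intervals
  simp only [mask_to_intervals, mask_to_intervals_alt, pvA_k, pvB_k]
  rcases hk : pvLastFixed mask.toList 0 with _ | k
  · simp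
  · obtain ⟨hk0, hklen, hkfix⟩ := pvLastFixed_bounds _ _ _ hk
    rw [show k - 0 = k from by ring] at hklen hkfix
    have hkn : k.toNat < mask.toList.length := by omega
    have hkc : ((k.toNat : Int)) = k := by omega
    obtain ⟨hkw, hall⟩ := hfix k.toNat hkn hkfix
    -- the prefix mask[0:k+1] and derived quantities
    set L : Nat := k.toNat + 1 with hL
    set ds : List Char := mask.toList.take L with hds
    have hLle : L ≤ mask.toList.length := by omega
    have hdsl : ds.length = L := by rw [hds, List.length_take]; omega
    have htake : ∀ j < L, mask.toList.getD j ' ' = ds.getD j ' ' := by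
      intro j hj
      rw [hds, List.getD_eq_getElem?_getD, List.getD_eq_getElem?_getD, List.getElem?_take_of_lt hj]
    have hall01 : ∀ c ∈ ds, c = '0' ∨ c = '1' ∨ c = 'x' := by
      intro c hc
      obtain ⟨j, hj, rfl⟩ := List.mem_iff_getElem.mp hc
      have hj' : j < L := by omega
      have : ds[j] = ds.getD j ' ' := by rw [List.getD_eq_getElem?_getD, List.getElem?_eq_getElem hj]; rfl
      rw [this, ← htake j hj']
      exact hall j (by omega)
    have hrange : PySem.List.pyRange 0 (k + 1) 1 = (List.range L).map (Nat.cast : Nat → Int) := by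
      rw [PySem.List.pyRange_one]
      have : (k + 1 - 0).toNat = L := by omega
      rw [this]
      exact List.map_congr_left (fun t _ => by simp)
    have hmissing : (PySem.List.pyRange 0 (k + 1) 1).filter
        (fun i => PySem.List.pyGetD mask.toList i ' ' == 'x')
          = (pvMiss ds).map (Nat.cast : Nat → Int) := by
      rw [hrange, List.filter_map]
      have : (List.range L).filter ((fun i => PySem.List.pyGetD mask.toList i ' ' == 'x')
          ∘ (Nat.cast : Nat → Int)) = (List.range L).filter (fun j => ds.getD j ' ' == 'x') := by
        apply List.filter_congr
        intro j hj
        rw [List.mem_range] at hj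
        simp only [Function.comp, PySem.List.pyGetD_natCast, htake j hj]
      rw [this, ← hdsl, range_filter_miss]
    have hbase : (PySem.List.pyRange 0 (k + 1) 1).map (fun i =>
          if PySem.List.pyGetD mask.toList i ' ' == '0' || PySem.List.pyGetD mask.toList i ' ' == '1'
          then some (PySem.List.pyGetD mask.toList i ' ') else none)
        = ds.map (fun ch => if ch == '0' || ch == '1' then some ch else none) := by
      rw [hrange, List.map_map]
      have : ∀ j ∈ List.range L, ((fun i =>
          if PySem.List.pyGetD mask.toList i ' ' == '0' || PySem.List.pyGetD mask.toList i ' ' == '1'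
          then some (PySem.List.pyGetD mask.toList i ' ') else none) ∘ (Nat.cast : Nat → Int)) j
          = (fun j => if ds.getD j ' ' == '0' || ds.getD j ' ' == '1'
              then some (ds.getD j ' ') else none) j := by
        intro j hj
        rw [List.mem_range] at hj
        simp only [Function.comp, PySem.List.pyGetD_natCast, htake j hj]
      rw [List.map_congr_left this, ← hdsl]
      exact map_range_getD ds (fun ch => if ch == '0' || ch == '1' then some ch else none) ' '
    set e : Nat := (width - L).toNat with he
    have hpfx : ∀ pfx : List Char, pfx.length = L →
        prefix_to_interval pfx width
          = some (pvParse pfx * 2 ^ e, (pvParse pfx + 1) * 2 ^ e) := by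
      intro pfx hlen
      have hne : ¬(pfx = []) := by intro h; rw [h] at hlen; simp [hL] at hlen
      have hgt : ¬((pfx.length : Int) > width) := by rw [hlen]; omega
      simp only [prefix_to_interval, if_neg hne, hlen]
      rw [if_neg (show ¬((L : Int) > width) by omega), ← he]
      rfl
    have hwidthpow : (2 : Int) ^ width.toNat = 0 + 2 ^ (ds.length + e) := by
      rw [hdsl]
      have : width.toNat = L + e := by omega
      rw [this]
      ring
    have hzip : ∀ (bits : List Char) (B : List (Option Char)),
        (((pvMiss ds).map (Nat.cast : Nat → Int)).zip bits).foldl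
            (fun t pb => t.set pb.1.toNat (some pb.2)) B
          = ((pvMiss ds).zip bits).foldl (fun t pb => t.set pb.1 (some pb.2)) B := by
      intro bits B
      rw [List.zip_map_left, List.foldl_map]
      simp
    -- B side
    have hBif1 : ¬(k < 0) := by omega
    have hBif2 : ¬(k + 1 > width) := by omega
    have hBtake : (k + 1).toNat = L := by omega
    have hBside : (if k < 0 then [((0 : Int), (2 : Int) ^ width.toNat)]
          else if k + 1 > width then []
          else recurseB (mask.toList.take (k + 1).toNat) 0 (2 ^ width.toNat))
        = (pvVals ds).map (fun v => (v * 2 ^ e, (v + 1) * 2 ^ e)) := by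
      rw [if_neg hBif1, if_neg hBif2, hBtake, ← hds, hwidthpow, pvRecurseB_eq]
      simp
    simp only [Option.getD_some]
    rw [hBside, hmissing, hbase]
    by_cases hm : pvMiss ds = []
    · -- no 'x' before the last fixed bit: single interval
      have hcnt : ds.count 'x' = 0 := by rw [← length_pvMiss, hm]; rfl
      have hjoin := pvSubst_join ds hall01 [] (by simp [hcnt])
      rw [hm] at hjoin
      simp only [List.zip_nil_left, List.foldl_nil] at hjoin
      have hv : pvVals ds = [pvParse (pvSubst ds [])] := by
        rw [← pvProd_vals ds hall01, hcnt]
        rfl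
      rw [hm, List.map_nil, if_pos rfl, hjoin, hv]
      simp [hpfx (pvSubst ds []) (by rw [pvSubst_length, hdsl])]
    · rw [if_neg (by simpa using hm)]
      have hlenm : ((pvMiss ds).map (Nat.cast : Nat → Int)).length = ds.count 'x' := by
        rw [List.length_map, length_pvMiss]
      rw [hlenm]
      refine Eq.trans (PySem.List.foldl_congr_mem'
        (g := fun out bits => out ++ [((pvParse (pvSubst ds bits)) * 2 ^ e,
          (pvParse (pvSubst ds bits) + 1) * 2 ^ e)]) _ _ _ ?_) ?_
      · intro bits hb out
        rw [hzip, pvSubst_join ds hall01 bits (pvProd_mem_length _ _ hb)]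
        simp [hpfx (pvSubst ds bits) (by rw [pvSubst_length, hdsl])]
      · rw [PySem.List.foldl_append_singleton_eq_map, List.nil_append,
          ← pvProd_vals ds hall01, List.map_map]
        rfl
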